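-- pv_equiv track=rewrite | github.com/gemseo/gemseo | src/gemseo/post/variable_influence.py | __compute_optimal_grid
-- ===== SOURCE A (Python) =====
-- def __compute_optimal_grid(n_items: int) -> tuple[int, int]:
--     """Compute the optimal grid given a number of items.
--
--     Args:
--         n_items: The number of items.
--
--     Returns:
--         The optimal number of rows and columns.
--     """
--     optimal_n_rows, optimal_n_cols = 1, 1
--     smallest_difference = float("inf")
--     for n_rows in range(1, n_items + 1):
--         for n_cols in range(1, n_items + 1):
--             d1 = n_rows - n_cols
--             d2 = n_rows * n_cols - n_items
--             difference = (d1 + 1) * (d2 + 1)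
--             if d1 > 0 and d2 > 0 and difference < smallest_difference:
--                 smallest_difference = difference
--                 optimal_n_rows, optimal_n_cols = n_rows, n_cols
--
--     return optimal_n_rows, optimal_n_cols
-- ===== SOURCE B (Python) =====
-- def __compute_optimal_grid(n_items: int) -> tuple[int, int]:
--     """Compute the optimal grid given a number of items (single pass over columns).
--
--     For a fixed number of columns, the difference metric is strictly increasing
--     in the number of rows over the valid region, so only the minimal valid
--     number of rows per column needs to be examined; ties are resolved exactly
--     as the row-major strict-< scan does, via the key (difference, rows, cols).
--     """
--     best = None
--     for n_cols in range(1, n_items + 1):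
--         n_rows = max(n_cols + 1, n_items // n_cols + 1)
--         if n_rows > n_items:
--             continue
--         difference = (n_rows - n_cols + 1) * (n_rows * n_cols - n_items + 1)
--         key = (difference, n_rows, n_cols)
--         if best is None or key < best:
--             best = key
--     if best is None:
--         return 1, 1
--     return best[1], best[2]
-- ===== Notes on version B (the rewrite author's own statement) =====
-- stated objective: faster
-- what changed: Replaces the O(n^2) double scan over all (rows, cols) pairs by a single pass over columns that evaluates only the minimal valid row count per column (the metric is strictly increasing in rows) and keeps the lexicographic minimum of (difference, rows, cols), which reproduces A's strict-< row-major tie-breaking.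
import Mathlib
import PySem

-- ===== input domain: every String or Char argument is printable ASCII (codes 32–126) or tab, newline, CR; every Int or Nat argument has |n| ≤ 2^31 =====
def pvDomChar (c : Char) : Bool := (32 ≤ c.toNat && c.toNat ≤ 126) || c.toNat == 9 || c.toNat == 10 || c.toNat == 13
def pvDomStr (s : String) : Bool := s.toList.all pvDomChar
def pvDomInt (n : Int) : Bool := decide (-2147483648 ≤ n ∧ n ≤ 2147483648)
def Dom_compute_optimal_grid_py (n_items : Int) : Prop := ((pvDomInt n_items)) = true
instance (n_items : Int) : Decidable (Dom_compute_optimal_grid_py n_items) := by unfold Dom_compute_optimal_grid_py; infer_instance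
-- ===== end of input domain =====

-- B replaces A's O(n^2) double scan by a single pass over columns (proved equal; a timing run measures the speed-up).

-- ===== PORT A =====
-- Literal port of A's double loop; Python's float("inf") initial value of
-- smallest_difference is modeled as `none : Option Int` (every later value is an int,
-- and `difference < inf` is always true — the `none` branch of the match).
def compute_optimal_grid_py (n_items : Int) : Int × Int :=
  let st := (PySem.List.pyRange 1 (n_items + 1)).foldl
    (fun (st : Int × Int × Option Int) n_rows =>
      (PySem.List.pyRange 1 (n_items + 1)).foldl
        (fun (st : Int × Int × Option Int) n_cols =>
          let d1 := n_rows - n_cols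
          let d2 := n_rows * n_cols - n_items
          let difference := (d1 + 1) * (d2 + 1)
          if (decide (0 < d1) && decide (0 < d2) &&
              (match st.2.2 with
               | none => true
               | some s => decide (difference < s)))
          then (n_rows, n_cols, some difference)
          else st) st)
    (1, 1, none)
  (st.1, st.2.1)

-- ===== PORT B =====
-- Literal port of Source B: one pass over n_cols; per column only the minimal valid
-- n_rows; Python's tuple `<` on (difference, n_rows, n_cols) written out lexicographically.
def compute_optimal_grid_py_alt (n_items : Int) : Int × Int :=
  let best := (PySem.List.pyRange 1 (n_items + 1)).foldl
    (fun (best : Option (Int × Int × Int)) n_cols =>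
      let n_rows := max (n_cols + 1) (PySem.Int.floordiv n_items n_cols + 1)
      if n_items < n_rows then best
      else
        let difference := (n_rows - n_cols + 1) * (n_rows * n_cols - n_items + 1)
        let key : Int × Int × Int := (difference, n_rows, n_cols)
        match best with
        | none => some key
        | some b =>
          if key.1 < b.1 ∨ (key.1 = b.1 ∧ (key.2.1 < b.2.1 ∨ (key.2.1 = b.2.1 ∧ key.2.2 < b.2.2)))
          then some key else some b) none
  match best with
  | none => (1, 1)
  | some b => (b.2.1, b.2.2)

-- ===== PRECONDITION & SPEC =====
def Spec_compute_optimal_grid_py (n_items : Int) (out : Int × Int) : Prop := out = compute_optimal_grid_py_alt n_items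
instance (n_items : Int) (out : Int × Int) : Decidable (Spec_compute_optimal_grid_py n_items out) := by unfold Spec_compute_optimal_grid_py; infer_instance

-- ===== CLAIM (what is proved, stated in full; the proofs are below) =====
def Claim_equal_compute_optimal_grid_py : Prop := ∀ (n_items : Int), Dom_compute_optimal_grid_py n_items → Spec_compute_optimal_grid_py n_items (compute_optimal_grid_py n_items)

-- ===== LEMMAS AND PROOFS =====

-- The key a candidate (n_rows, n_cols) is judged by: (difference, n_rows, n_cols).
def pvKey (n r c : Int) : Int × Int × Int := ((r - c + 1) * (r * c - n + 1), r, c)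

-- Strict lexicographic order on keys (= Python tuple <) and its reflexive closure.
def pvLt (x y : Int × Int × Int) : Prop :=
  x.1 < y.1 ∨ (x.1 = y.1 ∧ (x.2.1 < y.2.1 ∨ (x.2.1 = y.2.1 ∧ x.2.2 < y.2.2)))

def pvLe (x y : Int × Int × Int) : Prop := pvLt x y ∨ x = y

-- Keep the lexicographically smaller key (first wins on equality).
def pvMin (o : Option (Int × Int × Int)) (k : Int × Int × Int) : Option (Int × Int × Int) :=
  match o with
  | none => some k
  | some b =>
    if k.1 < b.1 ∨ (k.1 = b.1 ∧ (k.2.1 < b.2.1 ∨ (k.2.1 = b.2.1 ∧ k.2.2 < b.2.2)))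
    then some k else some b

def pvUnpack : Option (Int × Int × Int) → Int × Int
  | none => (1, 1)
  | some b => (b.2.1, b.2.2)

-- A's candidate pairs in row-major order, and the keys of its valid candidates.
def pvPairs (n : Int) : List (Int × Int) :=
  (PySem.List.pyRange 1 (n + 1)).flatMap
    (fun r => (PySem.List.pyRange 1 (n + 1)).map (fun c => (r, c)))

def pvLA (n : Int) : List (Int × Int × Int) :=
  ((pvPairs n).filter (fun p => decide (0 < p.1 - p.2) && decide (0 < p.1 * p.2 - n))).map
    (fun p => pvKey n p.1 p.2)

-- B's candidate keys: per column the minimal valid row count.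
def pvLB (n : Int) : List (Int × Int × Int) :=
  (PySem.List.pyRange 1 (n + 1)).filterMap (fun c =>
    let r := max (c + 1) (PySem.Int.floordiv n c + 1)
    if n < r then none else some (pvKey n r c))

-- A's loop state as a function of the best key so far.
def pvStateOf : Option (Int × Int × Int) → Int × Int × Option Int
  | none => (1, 1, none)
  | some b => (b.2.1, b.2.2, some b.1)

-- A's inner-loop body on a (row, col) pair.
def pvStepA (n : Int) (st : Int × Int × Option Int) (p : Int × Int) : Int × Int × Option Int :=
  let d1 := p.1 - p.2
  let d2 := p.1 * p.2 - n
  let difference := (d1 + 1) * (d2 + 1)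
  if (decide (0 < d1) && decide (0 < d2) &&
      (match st.2.2 with
       | none => true
       | some s => decide (difference < s)))
  then (p.1, p.2, some difference)
  else st

-- Row-major order on pairs.
def pvPairLt (p q : Int × Int) : Prop := p.1 < q.1 ∨ (p.1 = q.1 ∧ p.2 < q.2)

-- ---- order facts ----

lemma pvLt_asymm {x y : Int × Int × Int} (h : pvLt x y) : ¬ pvLt y x := by
  obtain ⟨a, b, c⟩ := x; obtain ⟨d, e, f⟩ := y
  simp only [pvLt] at *; omega

lemma pvLt_total (x y : Int × Int × Int) : pvLt x y ∨ x = y ∨ pvLt y x := by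
  obtain ⟨a, b, c⟩ := x; obtain ⟨d, e, f⟩ := y
  simp only [pvLt, Prod.mk.injEq]; omega

lemma pvLt_trans {x y z : Int × Int × Int} (h1 : pvLt x y) (h2 : pvLt y z) : pvLt x z := by
  obtain ⟨a, b, c⟩ := x; obtain ⟨d, e, f⟩ := y; obtain ⟨g, h, i⟩ := z
  simp only [pvLt] at *; omega

lemma pvLe_trans {x y z : Int × Int × Int} (h1 : pvLe x y) (h2 : pvLe y z) : pvLe x z := by
  rcases h1 with h1 | rfl
  · rcases h2 with h2 | rfl
    · exact Or.inl (pvLt_trans h1 h2)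
    · exact Or.inl h1
  · exact h2

lemma pvLe_antisymm {x y : Int × Int × Int} (h1 : pvLe x y) (h2 : pvLe y x) : x = y := by
  rcases h1 with h1 | rfl
  · rcases h2 with h2 | rfl
    · exact absurd h2 (pvLt_asymm h1)
    · rfl
  · rfl

lemma pvLe_of_not_lt {x y : Int × Int × Int} (h : ¬ pvLt x y) : pvLe y x := by
  rcases pvLt_total y x with h' | h' | h'
  · exact Or.inl h'
  · exact Or.inr h'
  · exact absurd h' h

-- ---- pvMin fold facts ----

lemma pvMin_some_cases (x k : Int × Int × Int) :
    (pvLt k x ∧ pvMin (some x) k = some k) ∨ (¬ pvLt k x ∧ pvMin (some x) k = some x) := by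
  by_cases h : k.1 < x.1 ∨ (k.1 = x.1 ∧ (k.2.1 < x.2.1 ∨ (k.2.1 = x.2.1 ∧ k.2.2 < x.2.2)))
  · exact Or.inl ⟨h, by simp only [pvMin, if_pos h]⟩
  · exact Or.inr ⟨h, by simp only [pvMin, if_neg h]⟩

lemma pvMin_eq (b : Option (Int × Int × Int)) (k : Int × Int × Int) :
    pvMin b k = some k ∨ pvMin b k = b := by
  cases b with
  | none => exact Or.inl rfl
  | some x =>
    rcases pvMin_some_cases x k with ⟨-, h⟩ | ⟨-, h⟩
    · exact Or.inl h
    · exact Or.inr h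

lemma pvMin_le_arg (b : Option (Int × Int × Int)) (k m : Int × Int × Int)
    (h : pvMin b k = some m) : pvLe m k := by
  cases b with
  | none =>
    have hk : k = m := Option.some.inj h
    exact Or.inr hk.symm
  | some x =>
    rcases pvMin_some_cases x k with ⟨hlt, he⟩ | ⟨hlt, he⟩
    · rw [he] at h
      exact Or.inr (Option.some.inj h).symm
    · rw [he] at h
      obtain rfl := Option.some.inj h
      exact pvLe_of_not_lt hlt

lemma pvMin_le_old (x k m : Int × Int × Int)
    (h : pvMin (some x) k = some m) : pvLe m x := by
  rcases pvMin_some_cases x k with ⟨hlt, he⟩ | ⟨hlt, he⟩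
  · rw [he] at h
    obtain rfl := Option.some.inj h
    exact Or.inl hlt
  · rw [he] at h
    exact Or.inr (Option.some.inj h).symm

lemma pvFold_ne_none : ∀ (l : List (Int × Int × Int)) (x : Int × Int × Int),
    l.foldl pvMin (some x) ≠ none := by
  intro l
  induction l with
  | nil => intro x h; simp at h
  | cons k l ih =>
    intro x
    rw [List.foldl_cons]
    rcases pvMin_eq (some x) k with h | h <;> rw [h] <;> exact ih _

lemma pvFold_none {l : List (Int × Int × Int)} {b : Option (Int × Int × Int)}
    (h : l.foldl pvMin b = none) : b = none ∧ l = [] := by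
  cases b with
  | some x => exact absurd h (pvFold_ne_none l x)
  | none =>
    cases l with
    | nil => exact ⟨rfl, rfl⟩
    | cons k l =>
      rw [List.foldl_cons, show pvMin none k = some k from rfl] at h
      exact absurd h (pvFold_ne_none l k)

lemma pvFold_mem : ∀ (l : List (Int × Int × Int)) (b : Option (Int × Int × Int))
    (m : Int × Int × Int), l.foldl pvMin b = some m → b = some m ∨ m ∈ l := by
  intro l
  induction l with
  | nil => intro b m h; exact Or.inl h
  | cons k l ih =>
    intro b m h
    rw [List.foldl_cons] at h
    rcases ih _ _ h with h' | h'
    · rcases pvMin_eq b k with hk | hk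
      · rw [hk] at h'
        exact Or.inr (by simp [Option.some.inj h'])
      · rw [hk] at h'
        exact Or.inl h'
    · exact Or.inr (List.mem_cons_of_mem _ h')

lemma pvFold_le : ∀ (l : List (Int × Int × Int)) (b : Option (Int × Int × Int))
    (m : Int × Int × Int), l.foldl pvMin b = some m →
    (∀ j ∈ l, pvLe m j) ∧ (∀ j, b = some j → pvLe m j) := by
  intro l
  induction l with
  | nil =>
    intro b m h
    constructor
    · intro j hj
      cases hj
    · intro j hj
      rw [hj] at h
      exact Or.inr (Option.some.inj h).symm
  | cons k l ih =>
    intro b m h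
    rw [List.foldl_cons] at h
    obtain ⟨h1, h2⟩ := ih _ _ h
    have hb' : ∃ m', pvMin b k = some m' := by
      rcases pvMin_eq b k with hk | hk
      · exact ⟨k, hk⟩
      · cases b with
        | none => exact ⟨k, rfl⟩
        | some x => exact ⟨x, hk⟩
    obtain ⟨m', hm'⟩ := hb'
    have hmm' : pvLe m m' := h2 m' hm'
    constructor
    · intro j hj
      rcases List.mem_cons.mp hj with rfl | hj
      · exact pvLe_trans hmm' (pvMin_le_arg b j m' hm')
      · exact h1 j hj
    · intro j hj
      subst hj
      exact pvLe_trans hmm' (pvMin_le_old j k m' hm')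

-- ---- A's fold computes the lexicographic minimum ----

lemma pvA_fold (n : Int) : ∀ (P : List (Int × Int)) (b : Option (Int × Int × Int)),
    P.Pairwise pvPairLt →
    (∀ p ∈ P, ∀ k, b = some k → pvPairLt (k.2.1, k.2.2) p) →
    P.foldl (pvStepA n) (pvStateOf b)
      = pvStateOf (((P.filter (fun p => decide (0 < p.1 - p.2) && decide (0 < p.1 * p.2 - n))).map
          (fun p => pvKey n p.1 p.2)).foldl pvMin b) := by
  intro P
  induction P with
  | nil => intro b _ _; rfl
  | cons p P ih =>
    intro b hpw horder
    obtain ⟨pr, pc⟩ := p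
    rw [List.foldl_cons]
    by_cases hv : 0 < pr - pc ∧ 0 < pr * pc - n
    · -- valid candidate: it enters the filtered list as pvKey n pr pc
      rw [List.filter_cons_of_pos (by simp only [Bool.and_eq_true, decide_eq_true_eq]; exact hv),
        List.map_cons, List.foldl_cons]
      cases b with
      | none =>
        have hstep : pvStepA n (pvStateOf none) (pr, pc) = pvStateOf (some (pvKey n pr pc)) := by
          show (if ((decide (0 < pr - pc) && decide (0 < pr * pc - n) && true) = true)
                then (pr, pc, some ((pr - pc + 1) * (pr * pc - n + 1)))
                else pvStateOf none) = _
          rw [if_pos (by simp only [Bool.and_eq_true, decide_eq_true_eq]; exact ⟨⟨hv.1, hv.2⟩, trivial⟩)]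
          rfl
        rw [hstep, show pvMin none (pvKey n pr pc) = some (pvKey n pr pc) from rfl]
        exact ih (some (pvKey n pr pc)) hpw.of_cons
          (by intro q hq k hk
              obtain rfl := Option.some.inj hk
              exact (List.pairwise_cons.mp hpw).1 q hq)
      | some x =>
        obtain ⟨xd, xr, xc⟩ := x
        have hord : pvPairLt (xr, xc) (pr, pc) :=
          horder (pr, pc) List.mem_cons_self (xd, xr, xc) rfl
        by_cases hd : (pr - pc + 1) * (pr * pc - n + 1) < xd
        · have hstep : pvStepA n (pvStateOf (some (xd, xr, xc))) (pr, pc)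
              = pvStateOf (some (pvKey n pr pc)) := by
            show (if ((decide (0 < pr - pc) && decide (0 < pr * pc - n) &&
                      decide ((pr - pc + 1) * (pr * pc - n + 1) < xd)) = true)
                  then (pr, pc, some ((pr - pc + 1) * (pr * pc - n + 1)))
                  else pvStateOf (some (xd, xr, xc))) = _
            rw [if_pos (by simp only [Bool.and_eq_true, decide_eq_true_eq]
                           exact ⟨⟨hv.1, hv.2⟩, hd⟩)]
            rfl
          have hmin : pvMin (some (xd, xr, xc)) (pvKey n pr pc) = some (pvKey n pr pc) := by
            rcases pvMin_some_cases (xd, xr, xc) (pvKey n pr pc) with ⟨-, he⟩ | ⟨hlt, -⟩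
            · exact he
            · exact absurd (Or.inl hd) hlt
          rw [hstep, hmin]
          exact ih (some (pvKey n pr pc)) hpw.of_cons
            (by intro q hq k hk
                obtain rfl := Option.some.inj hk
                exact (List.pairwise_cons.mp hpw).1 q hq)
        · have hstep : pvStepA n (pvStateOf (some (xd, xr, xc))) (pr, pc)
              = pvStateOf (some (xd, xr, xc)) := by
            show (if ((decide (0 < pr - pc) && decide (0 < pr * pc - n) &&
                      decide ((pr - pc + 1) * (pr * pc - n + 1) < xd)) = true)
                  then (pr, pc, some ((pr - pc + 1) * (pr * pc - n + 1)))
                  else pvStateOf (some (xd, xr, xc))) = _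
            rw [if_neg (by simp only [Bool.and_eq_true, decide_eq_true_eq]
                           intro h
                           exact hd h.2)]
          have hmin : pvMin (some (xd, xr, xc)) (pvKey n pr pc) = some (xd, xr, xc) := by
            rcases pvMin_some_cases (xd, xr, xc) (pvKey n pr pc) with ⟨hlt, -⟩ | ⟨-, he⟩
            · exfalso
              simp only [pvLt, pvKey, pvPairLt] at hlt hord
              omega
            · exact he
          rw [hstep, hmin]
          exact ih (some (xd, xr, xc)) hpw.of_cons
            (by intro q hq k hk
                exact horder q (List.mem_cons_of_mem _ hq) k hk)
    · -- invalid candidate: both sides skip it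
      rw [List.filter_cons_of_neg (by simp only [Bool.and_eq_true, decide_eq_true_eq]; exact hv)]
      have hstep : pvStepA n (pvStateOf b) (pr, pc) = pvStateOf b := by
        show (if ((decide (0 < pr - pc) && decide (0 < pr * pc - n) &&
                  (match (pvStateOf b).2.2 with
                   | none => true
                   | some s => decide ((pr - pc + 1) * (pr * pc - n + 1) < s))) = true)
              then (pr, pc, some ((pr - pc + 1) * (pr * pc - n + 1)))
              else pvStateOf b) = _
        rw [if_neg (by simp only [Bool.and_eq_true, decide_eq_true_eq]
                       intro h
                       exact hv ⟨h.1.1, h.1.2⟩)]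
      rw [hstep]
      exact ih b hpw.of_cons
        (by intro q hq k hk; exact horder q (List.mem_cons_of_mem _ hq) k hk)

lemma pvPairs_pairwise (n : Int) : (pvPairs n).Pairwise pvPairLt := by
  rw [pvPairs, List.pairwise_flatMap]
  constructor
  · intro r _
    rw [List.pairwise_map]
    exact (PySem.List.pairwise_lt_pyRange_one 1 (n + 1)).imp (fun h => Or.inr ⟨rfl, h⟩)
  · refine (PySem.List.pairwise_lt_pyRange_one 1 (n + 1)).imp ?_
    intro a b hab x hx y hy
    simp only [List.mem_map] at hx hy
    obtain ⟨c1, _, rfl⟩ := hx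
    obtain ⟨c2, _, rfl⟩ := hy
    exact Or.inl hab

-- ---- the two ports as pvMin folds ----

lemma pvA_eq (n : Int) :
    compute_optimal_grid_py n = pvUnpack ((pvLA n).foldl pvMin none) := by
  have h1 : compute_optimal_grid_py n
      = (let st := (pvPairs n).foldl (pvStepA n) (1, 1, none); (st.1, st.2.1)) := by
    rw [pvPairs, List.foldl_flatMap]
    simp only [List.foldl_map]
    rfl
  rw [h1]
  have h2 := pvA_fold n (pvPairs n) none (pvPairs_pairwise n)
    (by intro p _ k hk; cases hk)
  simp only [show ((1, 1, none) : Int × Int × Option Int) = pvStateOf none from rfl, h2, pvLA]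
  cases ((pvPairs n).filter (fun p => decide (0 < p.1 - p.2) && decide (0 < p.1 * p.2 - n))).map
      (fun p => pvKey n p.1 p.2) |>.foldl pvMin none with
  | none => rfl
  | some b => rfl

lemma pvUnpack_match (X : Option (Int × Int × Int)) :
    (match X with
     | none => ((1 : Int), (1 : Int))
     | some b => (b.2.1, b.2.2)) = pvUnpack X := by
  cases X <;> rfl

lemma pvB_eq (n : Int) :
    compute_optimal_grid_py_alt n = pvUnpack ((pvLB n).foldl pvMin none) := by
  have hfold : (PySem.List.pyRange 1 (n + 1)).foldl
      (fun (best : Option (Int × Int × Int)) n_cols =>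
        let n_rows := max (n_cols + 1) (PySem.Int.floordiv n n_cols + 1)
        if n < n_rows then best
        else
          let difference := (n_rows - n_cols + 1) * (n_rows * n_cols - n + 1)
          let key : Int × Int × Int := (difference, n_rows, n_cols)
          match best with
          | none => some key
          | some b =>
            if key.1 < b.1 ∨ (key.1 = b.1 ∧ (key.2.1 < b.2.1 ∨ (key.2.1 = b.2.1 ∧ key.2.2 < b.2.2)))
            then some key else some b) none
      = (pvLB n).foldl pvMin none := by
    rw [pvLB, List.foldl_filterMap]
    congr 1
    funext b c
    try dsimp only
    by_cases hg : n < max (c + 1) (PySem.Int.floordiv n c + 1)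
    · rw [if_pos hg, if_pos hg]
    · rw [if_neg hg, if_neg hg]
      cases b <;> rfl
  show (match (PySem.List.pyRange 1 (n + 1)).foldl
      (fun (best : Option (Int × Int × Int)) n_cols =>
        let n_rows := max (n_cols + 1) (PySem.Int.floordiv n n_cols + 1)
        if n < n_rows then best
        else
          let difference := (n_rows - n_cols + 1) * (n_rows * n_cols - n + 1)
          let key : Int × Int × Int := (difference, n_rows, n_cols)
          match best with
          | none => some key
          | some b =>
            if key.1 < b.1 ∨ (key.1 = b.1 ∧ (key.2.1 < b.2.1 ∨ (key.2.1 = b.2.1 ∧ key.2.2 < b.2.2)))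
            then some key else some b) none with
    | none => ((1 : Int), (1 : Int))
    | some b => (b.2.1, b.2.2)) = _
  rw [hfold, pvUnpack_match]

-- ---- membership characterizations ----

lemma pv_mem_LA {n k} : k ∈ pvLA n ↔
    ∃ r c, (1 ≤ r ∧ r < n + 1) ∧ (1 ≤ c ∧ c < n + 1) ∧ 0 < r - c ∧ 0 < r * c - n ∧
      k = pvKey n r c := by
  simp only [pvLA, pvPairs, List.mem_map, List.mem_filter, List.mem_flatMap,
    PySem.List.mem_pyRange_one, Bool.and_eq_true, decide_eq_true_eq]
  constructor
  · rintro ⟨p, ⟨⟨r, hr, c, hc, rfl⟩, h1, h2⟩, rfl⟩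
    exact ⟨r, c, hr, hc, h1, h2, rfl⟩
  · rintro ⟨r, c, hr, hc, h1, h2, rfl⟩
    exact ⟨(r, c), ⟨⟨r, hr, c, hc, rfl⟩, h1, h2⟩, rfl⟩

lemma pv_mem_LB {n k} : k ∈ pvLB n ↔
    ∃ c, (1 ≤ c ∧ c < n + 1) ∧ ¬ n < max (c + 1) (PySem.Int.floordiv n c + 1) ∧
      k = pvKey n (max (c + 1) (PySem.Int.floordiv n c + 1)) c := by
  simp only [pvLB, List.mem_filterMap, PySem.List.mem_pyRange_one]
  constructor
  · rintro ⟨c, hc, hk⟩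
    try dsimp only at hk
    by_cases hg : n < max (c + 1) (PySem.Int.floordiv n c + 1)
    · rw [if_pos hg] at hk
      exact absurd hk (by simp)
    · rw [if_neg hg] at hk
      exact ⟨c, hc, hg, (Option.some.inj hk).symm⟩
  · rintro ⟨c, hc, hg, rfl⟩
    refine ⟨c, hc, ?_⟩
    try dsimp only
    rw [if_neg hg]

-- ---- the two candidate lists have the same minimum ----

lemma pvLB_sub_LA {n k} (h : k ∈ pvLB n) : k ∈ pvLA n := by
  rw [pv_mem_LB] at h
  obtain ⟨c, hc, hg, rfl⟩ := h
  rw [pv_mem_LA]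
  have hcpos : 0 < c := by omega
  have hq : n < (PySem.Int.floordiv n c + 1) * c :=
    (PySem.Int.floordiv_lt_iff_lt_mul hcpos).mp (by omega)
  set r := max (c + 1) (PySem.Int.floordiv n c + 1) with hrdef
  refine ⟨r, c, ⟨by omega, by omega⟩, ⟨by omega, by omega⟩, by omega, ?_, rfl⟩
  have hr : PySem.Int.floordiv n c + 1 ≤ r := le_max_right _ _
  nlinarith [hr, hq, hcpos]

lemma pvLA_dominated {n k} (h : k ∈ pvLA n) : ∃ k' ∈ pvLB n, pvLe k' k := by
  rw [pv_mem_LA] at h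
  obtain ⟨r, c, hr, hc, h1, h2, rfl⟩ := h
  have hcpos : 0 < c := by omega
  set r' := max (c + 1) (PySem.Int.floordiv n c + 1) with hrdef
  have hfl : PySem.Int.floordiv n c < r := (PySem.Int.floordiv_lt_iff_lt_mul hcpos).mpr
    (by nlinarith)
  have hr'r : r' ≤ r := by omega
  have hguard : ¬ n < r' := by omega
  refine ⟨pvKey n r' c, pv_mem_LB.mpr ⟨c, hc, hguard, rfl⟩, ?_⟩
  by_cases heq : r' = r
  · exact Or.inr (by rw [heq])
  · have hlt : r' < r := lt_of_le_of_ne hr'r heq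
    left
    -- strictly smaller difference: both factors are positive and strictly increasing in r
    have hq : n < (PySem.Int.floordiv n c + 1) * c :=
      (PySem.Int.floordiv_lt_iff_lt_mul hcpos).mp (by omega)
    have hv1 : 0 < r' - c := by omega
    have hv2 : 0 < r' * c - n := by nlinarith [le_max_right (c + 1) (PySem.Int.floordiv n c + 1)]
    have : (r' - c + 1) * (r' * c - n + 1) < (r - c + 1) * (r * c - n + 1) := by
      have hb : r' * c - n + 1 < r * c - n + 1 := by nlinarith
      have ha : r' - c + 1 < r - c + 1 := by omega
      nlinarith
    exact Or.inl this

lemma pvFold_LA_eq_LB (n : Int) :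
    (pvLA n).foldl pvMin none = (pvLB n).foldl pvMin none := by
  cases hA : (pvLA n).foldl pvMin none with
  | none =>
    obtain ⟨-, hnil⟩ := pvFold_none hA
    cases hB : (pvLB n).foldl pvMin none with
    | none => rfl
    | some k =>
      rcases pvFold_mem _ _ _ hB with h | h
      · cases h
      · have := pvLB_sub_LA h
        rw [hnil] at this
        cases this
  | some k1 =>
    have hk1mem : k1 ∈ pvLA n := by
      rcases pvFold_mem _ _ _ hA with h | h
      · cases h
      · exact h
    cases hB : (pvLB n).foldl pvMin none with
    | none =>
      obtain ⟨-, hnil⟩ := pvFold_none hB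
      obtain ⟨k', hk', -⟩ := pvLA_dominated hk1mem
      rw [hnil] at hk'
      cases hk'
    | some k2 =>
      have hk2mem : k2 ∈ pvLB n := by
        rcases pvFold_mem _ _ _ hB with h | h
        · cases h
        · exact h
      have h12 : pvLe k1 k2 := (pvFold_le _ _ _ hA).1 k2 (pvLB_sub_LA hk2mem)
      obtain ⟨k', hk'mem, hk'le⟩ := pvLA_dominated hk1mem
      have h2k' : pvLe k2 k' := (pvFold_le _ _ _ hB).1 k' hk'mem
      have h21 : pvLe k2 k1 := pvLe_trans h2k' hk'le
      rw [pvLe_antisymm h12 h21]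

-- ===== VERDICT (by name: the statement is the Claim_ definition above) =====
theorem compute_optimal_grid_py_spec : Claim_equal_compute_optimal_grid_py := by
  intro n _
  unfold Spec_compute_optimal_grid_py
  rw [pvA_eq, pvB_eq, pvFold_LA_eq_LB]
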